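-- pv_equiv track=rewrite | github.com/SR-Sunny-Raj/Hacktoberfest2021-DSA | 24. Cryptography/Playfair_Cipher.py | check_columns_rows
-- ===== SOURCE A (Python) =====
-- def check_columns_rows(set, mat):
--     index = 0
--     for i in range(0,25):
--         if(set[0] == mat[i]):
--             index = i
--             break
--     c1 = (int)(index%5)
--     r1 = (int)(index/5)
--     i1 = index
--
--     for i in range(0,25):
--         if(set[1] == mat[i]):
--             index = i
--             break
--     c2 = (int)(index%5)
--     r2 = (int)(index/5)
--     i2 = index
--     return (c1,r1,i1,c2,r2,i2)
-- ===== SOURCE B (Python) =====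
-- def check_columns_rows(set, mat):
--     a, b = set[0], set[1]
--     i1 = i2 = None
--     for k in range(min(25, len(mat)) - 1, -1, -1):
--         v = mat[k]
--         if v == a:
--             i1 = k
--         if v == b:
--             i2 = k
--     return (i1 % 5, i1 // 5, i1, i2 % 5, i2 // 5, i2)
-- ===== Notes on version B (the rewrite author's own statement) =====
-- stated objective: alternative
-- what changed: Replaces A's two independent forward break-on-first-match scans of mat by ONE fused backward pass over indices min(25,len(mat))-1..0 that updates both positions on every match (last write in the descending scan = first occurrence), then derives column/row from each index; Pre_ excludes inputs where A raises and those where a searched character is absent from the first 25 cells, where A's returned index (0, or the leftover i1) is an accident of its scan and the natural B hits None and raises TypeError.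
import Mathlib
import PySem

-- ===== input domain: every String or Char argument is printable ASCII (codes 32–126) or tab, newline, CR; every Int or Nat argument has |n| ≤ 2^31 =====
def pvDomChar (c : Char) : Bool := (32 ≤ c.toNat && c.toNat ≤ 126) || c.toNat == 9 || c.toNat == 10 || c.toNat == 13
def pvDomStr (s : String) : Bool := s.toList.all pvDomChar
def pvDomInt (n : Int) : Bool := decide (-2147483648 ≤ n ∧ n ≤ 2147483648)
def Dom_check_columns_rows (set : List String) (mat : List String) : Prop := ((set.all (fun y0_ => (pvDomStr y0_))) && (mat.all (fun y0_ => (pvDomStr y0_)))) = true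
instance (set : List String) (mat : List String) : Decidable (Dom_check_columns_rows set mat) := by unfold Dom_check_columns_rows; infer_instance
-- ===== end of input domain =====

-- B replaces A's two forward break-on-first scans by ONE backward pass that tracks both
-- positions at once (last write while descending = first occurrence). Objective: alternative.

-- ===== PORT A =====
-- 'for i in range(0,25): if set[k] == mat[i]: index = i; break'
def scanA (s : String) (mat : List String) : List Nat → Nat → Nat
  | [], index => index
  | i :: rest, index =>
    match PySem.List.pyGet? mat (i : Int) with
    | some v => if s == v then i else scanA s mat rest index
    | none => scanA s mat rest index   -- Python raises IndexError here; excluded by Pre_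

def check_columns_rows (set : List String) (mat : List String) : Int × Int × Int × Int × Int × Int :=
  let i1 := scanA ((PySem.List.pyGet? set 0).getD "") mat (List.range 25) 0
  let i2 := scanA ((PySem.List.pyGet? set 1).getD "") mat (List.range 25) i1
  (((i1 % 5 : Nat) : Int), ((i1 / 5 : Nat) : Int), (i1 : Int),
   ((i2 % 5 : Nat) : Int), ((i2 / 5 : Nat) : Int), (i2 : Int))

-- ===== PORT B =====
-- 'for k in range(min(25, len(mat)) - 1, -1, -1): v = mat[k]; if v == a: i1 = k; if v == b: i2 = k'
-- (every generated k satisfies 0 ≤ k < mat.length, so the .getD "" default of mat[k] is never taken)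
def scanB (a b : String) (mat : List String) : List Int → Option Int × Option Int → Option Int × Option Int
  | [], acc => acc
  | k :: rest, (j1, j2) =>
    let v := (PySem.List.pyGet? mat k).getD ""
    scanB a b mat rest ((if v == a then some k else j1), (if v == b then some k else j2))

def check_columns_rows_alt (set : List String) (mat : List String) : Int × Int × Int × Int × Int × Int :=
  let a := (PySem.List.pyGet? set 0).getD ""
  let b := (PySem.List.pyGet? set 1).getD ""
  let p := scanB a b mat (PySem.List.pyRange ((min 25 mat.length : Nat) - 1) (-1) (-1)) (none, none)
  let i1 := p.1.getD 0   -- 'None' here is a Python TypeError at i1 % 5; excluded by Pre_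
  let i2 := p.2.getD 0
  (PySem.Int.mod i1 5, PySem.Int.floordiv i1 5, i1,
   PySem.Int.mod i2 5, PySem.Int.floordiv i2 5, i2)

-- ===== PRECONDITION & SPEC =====
-- Pre_ excludes the inputs on which Python A raises (set shorter than 2, or mat[i] out of range in a
-- scan) and also those where a searched character is absent from the first 25 cells: there A still
-- returns a leftover index (0, or i1) as an accident of its scan, while the natural B hits None and
-- raises TypeError.
def Pre_check_columns_rows (set : List String) (mat : List String) : Prop :=
  2 ≤ set.length ∧ (set[0]?).getD "" ∈ mat.take 25 ∧ (set[1]?).getD "" ∈ mat.take 25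
instance (set : List String) (mat : List String) : Decidable (Pre_check_columns_rows set mat) := by
  unfold Pre_check_columns_rows; infer_instance

def pvWitness_check_columns_rows : List String × List String := (["a", "b"], ["c", "a", "b"])

def Spec_check_columns_rows (set : List String) (mat : List String) (out : Int × Int × Int × Int × Int × Int) : Prop := out = check_columns_rows_alt set mat
instance (set : List String) (mat : List String) (out : Int × Int × Int × Int × Int × Int) : Decidable (Spec_check_columns_rows set mat out) := by unfold Spec_check_columns_rows; infer_instance

-- ===== CLAIM (what is proved, stated in full; the proofs are below) =====
def Claim_equal_check_columns_rows : Prop := ∀ (set : List String) (mat : List String), Dom_check_columns_rows set mat → Pre_check_columns_rows set mat → Spec_check_columns_rows set mat (check_columns_rows set mat)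

-- ===== LEMMAS AND PROOFS =====

-- A's scan over range' j n returns j + (first matching offset in (mat.drop j).take n), else the default.
theorem scanA_eq (s : String) (mat : List String) :
    ∀ (n j d : Nat), scanA s mat (List.range' j n) d =
      (match ((mat.drop j).take n).findIdx? (fun v => s == v) with
       | some t => j + t
       | none => d) := by
  intro n
  induction n with
  | zero => intro j d; simp [scanA]
  | succ n ih =>
    intro j d
    rw [List.range'_succ]
    by_cases hj : j < mat.length
    · have hd : mat.drop j = mat[j] :: mat.drop (j + 1) := List.drop_eq_getElem_cons hj
      rw [hd]
      simp only [scanA, PySem.List.pyGet?_natCast, List.getElem?_eq_getElem hj,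
        List.take_succ_cons, List.findIdx?_cons]
      by_cases hs : s == mat[j]
      · simp [hs]
      · simp only [hs, Bool.false_eq_true, ih]
        cases (((mat.drop (j+1)).take n).findIdx? (fun v => s == v)) with
        | none => simp
        | some t => simp; ring
    · have h1 : mat.drop j = [] := List.drop_eq_nil_of_le (by omega)
      have h2 : mat.drop (j + 1) = [] := List.drop_eq_nil_of_le (by omega)
      have hg : mat[(j : Nat)]? = none := by
        rw [List.getElem?_eq_none_iff]; omega
      simp only [scanA, PySem.List.pyGet?_natCast, hg, ih, h1, h2]
      simp

-- B's fused pass splits into two independent single-target passes.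
def scan1 (s : String) (mat : List String) : List Int → Option Int → Option Int
  | [], j => j
  | k :: rest, j =>
    scan1 s mat rest (if (PySem.List.pyGet? mat k).getD "" == s then some k else j)

theorem scanB_eq_pair (a b : String) (mat : List String) :
    ∀ (ks : List Int) (j1 j2 : Option Int),
      scanB a b mat ks (j1, j2) = (scan1 a mat ks j1, scan1 b mat ks j2) := by
  intro ks
  induction ks with
  | nil => intro j1 j2; rfl
  | cons k rest ih => intro j1 j2; simp only [scanB, scan1, ih]

-- one backward pass over indices n-1 .. 0 computes the FIRST occurrence (last write wins).
theorem scan1_countdown (s : String) (mat : List String) :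
    ∀ (n : Nat), n ≤ mat.length → ∀ (j : Option Int),
      scan1 s mat (PySem.List.pyRange ((n : Int) - 1) (-1) (-1)) j =
        (match (mat.take n).findIdx? (fun v => v == s) with
         | some t => some (t : Int)
         | none => j) := by
  intro n
  induction n with
  | zero =>
    intro _ j
    rw [PySem.List.pyRange_neg_one_eq_nil (by omega)]
    simp [scan1]
  | succ n ih =>
    intro hn j
    have hlt : n < mat.length := by omega
    rw [show ((n + 1 : Nat) : Int) - 1 = (n : Nat) from by push_cast; ring,
      PySem.List.pyRange_neg_one_cons (by omega)]
    simp only [scan1]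
    have hget : (PySem.List.pyGet? mat ((n : Nat) : Int)).getD "" = mat[n] := by
      rw [PySem.List.pyGet?_natCast, List.getElem?_eq_getElem hlt]; rfl
    rw [hget, ih (by omega)]
    have htake : mat.take (n + 1) = mat.take n ++ [mat[n]] := by
      rw [List.take_add_one, List.getElem?_eq_getElem hlt]; rfl
    rw [htake, List.findIdx?_append]
    have hlen : (mat.take n).length = n := List.length_take_of_le (by omega)
    cases hf : (mat.take n).findIdx? (fun v => v == s) with
    | some t => simp
    | none =>
      by_cases hm : mat[n] == s
      · simp [List.findIdx?_cons, hm, hlen]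
      · simp [List.findIdx?_cons, hm]

-- a character known to occur in the window is found by findIdx?
theorem findIdx?_isSome_of_mem {s : String} {l : List String} (h : s ∈ l) :
    ∃ t, l.findIdx? (fun v => s == v) = some t := by
  cases hf : l.findIdx? (fun v => s == v) with
  | some t => exact ⟨t, rfl⟩
  | none =>
    have := List.findIdx?_eq_none_iff.mp hf s h
    simp at this

theorem pred_swap (s : String) : (fun v : String => v == s) = (fun v => s == v) := by
  funext v
  by_cases h : v = s
  · simp [h]
  · simp [h, Ne.symm h]

theorem take_min25 (mat : List String) : mat.take (min 25 mat.length) = mat.take 25 := by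
  rw [min_comm, ← List.take_take]
  exact List.take_of_length_le (by simp)

-- ===== VERDICT (by name: the statement is the Claim_ definition above) =====
theorem check_columns_rows_spec : Claim_equal_check_columns_rows := by
  intro set mat _ hpre
  obtain ⟨-, h0, h1⟩ := hpre
  unfold Spec_check_columns_rows check_columns_rows check_columns_rows_alt
  have hs0 : (PySem.List.pyGet? set 0).getD "" = (set[0]?).getD "" := by
    rw [PySem.List.pyGet?_zero]
  have hs1 : (PySem.List.pyGet? set 1).getD "" = (set[1]?).getD "" := by
    rw [show (1 : Int) = ((1 : Nat) : Int) from rfl, PySem.List.pyGet?_natCast]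
  have hA : ∀ (str : String) (d : Nat), scanA str mat (List.range 25) d =
      (match (mat.take 25).findIdx? (fun v => str == v) with
       | some t => t | none => d) := by
    intro str d
    rw [List.range_eq_range', scanA_eq]
    simp
  have hB : ∀ (str : String) (j : Option Int),
      scan1 str mat (PySem.List.pyRange ((min 25 mat.length : Nat) - 1) (-1) (-1)) j =
        (match (mat.take 25).findIdx? (fun v => str == v) with
         | some t => some (t : Int)
         | none => j) := by
    intro str j
    rw [show ((min 25 mat.length : Nat) - 1 : Int) = ((min 25 mat.length : Nat) : Int) - 1 from by push_cast; ring]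
    rw [scan1_countdown str mat (min 25 mat.length) (by omega) j]
    rw [take_min25, pred_swap]
  obtain ⟨t0, ht0⟩ := findIdx?_isSome_of_mem (s := (set[0]?).getD "") h0
  obtain ⟨t1, ht1⟩ := findIdx?_isSome_of_mem (s := (set[1]?).getD "") h1
  simp only [scanB_eq_pair, hA, hB, hs0, hs1, ht0, ht1]
  simp
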